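-- pv_equiv track=rewrite | github.com/Meera-Solgama/AI-Lawyer-Reader | AI_Legal_Document_Helper.py | highlight_important_words
-- ===== SOURCE A (Python) =====
-- STOP_WORDS = {
--     'the', 'is', 'am', 'are', 'was', 'were', 'be', 'been', 'being',
--     'this', 'that', 'those', 'these', 'by', 'of', 'at', 'to', 'from',
--     'and', 'or', 'for', 'in', 'on', 'with', 'as', 'an', 'a', 'any', 'all',
--     'into', 'shall', 'under', 'herein', 'out', 'against', 'it',
--     'made', 'entered', 'effective', 'date'
-- }
--
-- HIGH_IMPORTANCE_WORDS = {
--     'indemnify', 'indemnity', 'liability', 'damages', 'breach', 'arbitration',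
--     'jurisdiction', 'confidentiality', 'warranty', 'warranties', 'governing',
--     'termination', 'enforceable', 'compliance', 'representation', 'obligations',
--     'non-disclosure', 'force-majeure', 'infringement', 'assignability', 'patent',
--     'copyright', 'statute', 'litigation', 'claimant', 'settlement', 'compensation',
--     'fiduciary', 'limitation', 'promissory', 'mortgage', 'lien', 'covenant',
--     'subrogation', 'undertaking', 'escrow', 'attorney', 'precedent', 'due-diligence',
--     'guarantor', 'security-interest', 'liquidated', 'merger', 'acquisition',
--     'disclosure', 'proprietary', 'undertaking', 'clause', 'novation'
-- }
--
-- LOW_IMPORTANCE_WORDS = {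
--     'agreement', 'contract', 'parties', 'hereby', 'herein', 'herewith',
--     'therefore', 'whereas', 'pursuant', 'forthwith', 'aforesaid', 'hereto',
--     'hereunder', 'witnesseth', 'nonetheless', 'nevertheless', 'thereby',
--     'thereof', 'wherein', 'thenceforth', 'henceforth', 'hereinabove',
--     'therein', 'wherein', 'hereafter', 'whereby', 'hereunto', 'whenever',
--     'wherever', 'whichever', 'therewith', 'thereafter', 'thereby', 'thereto',
--     'thereunder', 'thereinbefore', 'whereinsoever', 'hereupon', 'amongst',
--     'accordingly', 'moreover', 'furthermore', 'pursuant', 'thereby', 'thence',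
--     'henceforth', 'hereinbefore', 'hereinafter'
-- }
--
-- def highlight_important_words(paragraph: str) -> str:
--     words = paragraph.split()
--     highlighted = []
--
--     for w in words:
--         word_plain = ''.join([ch for ch in w if ch.isalpha()]).lower()
--         if word_plain in HIGH_IMPORTANCE_WORDS:
--             highlighted.append(f"<span style='background-color:#8B0000; color:white'>{w}</span>")  # Dark red
--         elif word_plain in LOW_IMPORTANCE_WORDS:
--             highlighted.append(f"<span style='background-color:#ffb6c1'>{w}</span>")  # Light red
--         elif word_plain not in STOP_WORDS:
--             highlighted.append(f"<span style='background-color:#ffcccb'>{w}</span>")  # Light light red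
--         else:
--             highlighted.append(w)
--
--     return ' '.join(highlighted)
-- ===== SOURCE B (Python) =====
-- # B: single character-level streaming scan -- no split() and no per-word
-- # filter/join/lower pass: the raw word and its lowercase-alpha key are built
-- # incrementally char by char, words are wrapped (via one precomputed
-- # word -> (prefix, suffix) table) and flushed as whitespace is crossed.
--
-- _STOP = [
--     'the', 'is', 'am', 'are', 'was', 'were', 'be', 'been', 'being',
--     'this', 'that', 'those', 'these', 'by', 'of', 'at', 'to', 'from',
--     'and', 'or', 'for', 'in', 'on', 'with', 'as', 'an', 'a', 'any', 'all',
--     'into', 'shall', 'under', 'herein', 'out', 'against', 'it',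
--     'made', 'entered', 'effective', 'date'
-- ]
--
-- _HIGH = [
--     'indemnify', 'indemnity', 'liability', 'damages', 'breach', 'arbitration',
--     'jurisdiction', 'confidentiality', 'warranty', 'warranties', 'governing',
--     'termination', 'enforceable', 'compliance', 'representation', 'obligations',
--     'non-disclosure', 'force-majeure', 'infringement', 'assignability', 'patent',
--     'copyright', 'statute', 'litigation', 'claimant', 'settlement', 'compensation',
--     'fiduciary', 'limitation', 'promissory', 'mortgage', 'lien', 'covenant',
--     'subrogation', 'undertaking', 'escrow', 'attorney', 'precedent', 'due-diligence',
--     'guarantor', 'security-interest', 'liquidated', 'merger', 'acquisition',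
--     'disclosure', 'proprietary', 'undertaking', 'clause', 'novation'
-- ]
--
-- _LOW = [
--     'agreement', 'contract', 'parties', 'hereby', 'herein', 'herewith',
--     'therefore', 'whereas', 'pursuant', 'forthwith', 'aforesaid', 'hereto',
--     'hereunder', 'witnesseth', 'nonetheless', 'nevertheless', 'thereby',
--     'thereof', 'wherein', 'thenceforth', 'henceforth', 'hereinabove',
--     'therein', 'wherein', 'hereafter', 'whereby', 'hereunto', 'whenever',
--     'wherever', 'whichever', 'therewith', 'thereafter', 'thereby', 'thereto',
--     'thereunder', 'thereinbefore', 'whereinsoever', 'hereupon', 'amongst',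
--     'accordingly', 'moreover', 'furthermore', 'pursuant', 'thereby', 'thence',
--     'henceforth', 'hereinbefore', 'hereinafter'
-- ]
--
-- _CLOSE = "</span>"
-- _DEFAULT = ("<span style='background-color:#ffcccb'>", _CLOSE)
--
-- _WRAP = {}
-- for _w in _STOP:
--     _WRAP[_w] = ("", "")
-- for _w in _LOW:
--     _WRAP[_w] = ("<span style='background-color:#ffb6c1'>", _CLOSE)
-- for _w in _HIGH:
--     _WRAP[_w] = ("<span style='background-color:#8B0000; color:white'>", _CLOSE)
--
--
-- def _flush(raw, plain):
--     pre, suf = _WRAP.get(''.join(plain), _DEFAULT)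
--     return pre + ''.join(raw) + suf
--
--
-- def highlight_important_words(paragraph: str) -> str:
--     pieces = []
--     raw = []    # chars of the word being scanned
--     plain = []  # its lowercase alpha-only chars, built as we go
--     for ch in paragraph:
--         if ch.isspace():
--             if raw:
--                 pieces.append(_flush(raw, plain))
--                 raw, plain = [], []
--         else:
--             raw.append(ch)
--             if ch.isalpha():
--                 plain.append(ch.lower())
--     if raw:
--         pieces.append(_flush(raw, plain))
--     return ' '.join(pieces)
-- ===== Notes on version B (the rewrite author's own statement) =====
-- stated objective: alternative
-- what changed: Replaced split()-then-per-word processing (rebuilding each word's alpha-only lowercase key with a second pass and classifying via a three-set elif chain) by a single character-level streaming scan that builds each word and its lowercase-alpha key incrementally and flushes it through one precomputed word->(prefix,suffix) wrapper table at whitespace boundaries.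
import Mathlib
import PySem

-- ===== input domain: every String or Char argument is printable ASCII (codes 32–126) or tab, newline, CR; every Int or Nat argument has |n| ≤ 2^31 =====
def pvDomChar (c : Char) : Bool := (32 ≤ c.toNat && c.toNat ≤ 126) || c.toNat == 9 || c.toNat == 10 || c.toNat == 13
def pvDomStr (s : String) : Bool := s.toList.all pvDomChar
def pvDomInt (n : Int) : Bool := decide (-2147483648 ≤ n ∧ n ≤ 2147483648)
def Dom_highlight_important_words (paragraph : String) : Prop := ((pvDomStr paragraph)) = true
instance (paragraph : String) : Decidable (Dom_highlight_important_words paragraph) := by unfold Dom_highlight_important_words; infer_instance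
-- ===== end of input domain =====

-- B replaces A's split()/per-word-filter/elif pipeline by one character-level streaming
-- scan that builds each word and its lowercase-alpha key incrementally and wraps it from
-- a precomputed word → (prefix, suffix) table as whitespace is crossed; objective: alternative.

-- the word lists exactly as in the Python module's set literals (shared data of both ports)
def pvSTOP : List String := [
  "the", "is", "am", "are", "was", "were", "be", "been", "being",
  "this", "that", "those", "these", "by", "of", "at", "to", "from",
  "and", "or", "for", "in", "on", "with", "as", "an", "a", "any", "all",
  "into", "shall", "under", "herein", "out", "against", "it",
  "made", "entered", "effective", "date"]

def pvHIGH : List String := [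
  "indemnify", "indemnity", "liability", "damages", "breach", "arbitration",
  "jurisdiction", "confidentiality", "warranty", "warranties", "governing",
  "termination", "enforceable", "compliance", "representation", "obligations",
  "non-disclosure", "force-majeure", "infringement", "assignability", "patent",
  "copyright", "statute", "litigation", "claimant", "settlement", "compensation",
  "fiduciary", "limitation", "promissory", "mortgage", "lien", "covenant",
  "subrogation", "undertaking", "escrow", "attorney", "precedent", "due-diligence",
  "guarantor", "security-interest", "liquidated", "merger", "acquisition",
  "disclosure", "proprietary", "undertaking", "clause", "novation"]

def pvLOW : List String := [
  "agreement", "contract", "parties", "hereby", "herein", "herewith",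
  "therefore", "whereas", "pursuant", "forthwith", "aforesaid", "hereto",
  "hereunder", "witnesseth", "nonetheless", "nevertheless", "thereby",
  "thereof", "wherein", "thenceforth", "henceforth", "hereinabove",
  "therein", "wherein", "hereafter", "whereby", "hereunto", "whenever",
  "wherever", "whichever", "therewith", "thereafter", "thereby", "thereto",
  "thereunder", "thereinbefore", "whereinsoever", "hereupon", "amongst",
  "accordingly", "moreover", "furthermore", "pursuant", "thereby", "thence",
  "henceforth", "hereinbefore", "hereinafter"]

-- ===== PORT A =====
def STOP_WORDS : PySem.Set String := PySem.Set.ofList pvSTOP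
def HIGH_IMPORTANCE_WORDS : PySem.Set String := PySem.Set.ofList pvHIGH
def LOW_IMPORTANCE_WORDS : PySem.Set String := PySem.Set.ofList pvLOW

-- word_plain = ''.join([ch for ch in w if ch.isalpha()]).lower()
def pvPlain (w : String) : String :=
  PySem.Str.lower (PySem.Str.join "" ((w.toList.filter (fun ch => PySem.Chars.isalpha ch)).map (fun ch => String.ofList [ch])))

-- the body of A's for-loop (appends the highlighted word to the accumulator)
def pvBodyA (acc : List String) (w : String) : List String :=
  let word_plain := pvPlain w
  if PySem.Set.contains HIGH_IMPORTANCE_WORDS word_plain then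
    acc ++ ["<span style='background-color:#8B0000; color:white'>" ++ w ++ "</span>"]
  else if PySem.Set.contains LOW_IMPORTANCE_WORDS word_plain then
    acc ++ ["<span style='background-color:#ffb6c1'>" ++ w ++ "</span>"]
  else if !(PySem.Set.contains STOP_WORDS word_plain) then
    acc ++ ["<span style='background-color:#ffcccb'>" ++ w ++ "</span>"]
  else
    acc ++ [w]

def highlight_important_words (paragraph : String) : String :=
  PySem.Str.join " " ((PySem.Str.split₀ paragraph).foldl pvBodyA [])

-- ===== PORT B =====
def pvClose : String := "</span>"
def pvDefault : String × String := ("<span style='background-color:#ffcccb'>", pvClose)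

-- the module-level table: STOP, then LOW, then HIGH, so higher priority overwrites
def pvWrapTable : PySem.Dict String (String × String) :=
  pvHIGH.foldl (fun d w => d.insert w ("<span style='background-color:#8B0000; color:white'>", pvClose))
    (pvLOW.foldl (fun d w => d.insert w ("<span style='background-color:#ffb6c1'>", pvClose))
      (pvSTOP.foldl (fun d w => d.insert w ("", "")) PySem.Dict.empty))

-- _flush(raw, plain): wrap the finished word using the table
def pvFlush (raw plain : List Char) : String :=
  let p := PySem.Dict.getD pvWrapTable (String.ofList plain) pvDefault
  p.1 ++ String.ofList raw ++ p.2

-- the streaming scan: raw = chars of the word being scanned, plain = its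
-- lowercase alpha-only chars built as we go, pieces = wrapped words so far
def pvScan : List Char → List Char → List Char → List String → List String
  | [], raw, plain, pieces =>
      if raw.isEmpty then pieces else pieces ++ [pvFlush raw plain]
  | c :: rest, raw, plain, pieces =>
      if PySem.Chars.isspace c then
        if raw.isEmpty then pvScan rest [] [] pieces
        else pvScan rest [] [] (pieces ++ [pvFlush raw plain])
      else
        pvScan rest (raw ++ [c])
          (if PySem.Chars.isalpha c then plain ++ [PySem.Chars.lowerChar c] else plain) pieces

def highlight_important_words_alt (paragraph : String) : String :=
  PySem.Str.join " " (pvScan paragraph.toList [] [] [])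

-- ===== PRECONDITION & SPEC =====
def Spec_highlight_important_words (paragraph : String) (out : String) : Prop := out = highlight_important_words_alt paragraph
instance (paragraph : String) (out : String) : Decidable (Spec_highlight_important_words paragraph out) := by unfold Spec_highlight_important_words; infer_instance

-- ===== CLAIM (what is proved, stated in full; the proofs are below) =====
def Claim_equal_highlight_important_words : Prop := ∀ (paragraph : String), Dom_highlight_important_words paragraph → Spec_highlight_important_words paragraph (highlight_important_words paragraph)

-- ===== LEMMAS AND PROOFS =====

-- the lowercase alpha-only key of a word, as a pure function of its chars
def pvPlainChars (raw : List Char) : List Char :=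
  (raw.filter (fun ch => PySem.Chars.isalpha ch)).map PySem.Chars.lowerChar

-- the wrapper applied to one finished word
def pvWrapChars (w : List Char) : String := pvFlush w (pvPlainChars w)

-- A's word_plain computed over strings equals the char-level key
theorem pv_plain_eq (w : String) : pvPlain w = String.ofList (pvPlainChars w.toList) := by
  have h : (pvPlain w).toList = pvPlainChars w.toList := by
    simp [pvPlain, pvPlainChars, PySem.Str.toList_lower, PySem.Chars.lower,
      List.map_map, Function.comp_def, PySem.Chars.join_nil_singletons]
  calc pvPlain w = String.ofList (pvPlain w).toList := by simp
    _ = String.ofList (pvPlainChars w.toList) := by rw [h]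

theorem pvPlainChars_nil : pvPlainChars [] = [] := by simp [pvPlainChars]

-- looking a key up after a fold of constant-value inserts: hit anywhere in the list gives that value
theorem pv_get?_foldl_insert_const (v : String × String) (l : List String)
    (d : PySem.Dict String (String × String)) (k : String) :
    (l.foldl (fun d w => d.insert w v) d).get? k = if k ∈ l then some v else d.get? k := by
  induction l generalizing d with
  | nil => simp
  | cons x xs ih =>
      simp only [List.foldl_cons, ih, PySem.Dict.get?_insert, List.mem_cons]
      by_cases he : k = x <;> by_cases hx : k ∈ xs <;> simp [he, hx]

-- the per-word value of A's elif chain equals B's table wrapper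
theorem pv_body_eq (acc : List String) (w : String) :
    pvBodyA acc w = acc ++ [pvWrapChars w.toList] := by
  unfold pvBodyA pvWrapChars pvFlush
  simp only [pv_plain_eq]
  simp only [PySem.Dict.getD_eq_get?_getD, pvWrapTable, pv_get?_foldl_insert_const,
    PySem.Dict.get?_empty]
  simp only [STOP_WORDS, HIGH_IMPORTANCE_WORDS, LOW_IMPORTANCE_WORDS,
    PySem.Set.contains_iff, PySem.Set.mem_ofList]
  by_cases hH : String.ofList (pvPlainChars w.toList) ∈ pvHIGH <;>
    by_cases hL : String.ofList (pvPlainChars w.toList) ∈ pvLOW <;>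
      by_cases hS : String.ofList (pvPlainChars w.toList) ∈ pvSTOP <;>
        simp [hH, hL, hS, pvDefault, pvClose, String.empty_append, String.append_empty]

theorem pv_loop_eq (ws : List String) (acc : List String) :
    ws.foldl pvBodyA acc = acc ++ ws.map (fun w => pvWrapChars w.toList) := by
  induction ws generalizing acc with
  | nil => simp
  | cons x xs ih => simp [List.foldl_cons, pv_body_eq, ih]

-- split₀.go's accumulator just prepends (reversed)
theorem pv_go_acc (cs : List Char) (cur : List Char) (acc : List (List Char)) :
    PySem.Chars.split₀.go cs cur acc = acc.reverse ++ PySem.Chars.split₀.go cs cur [] := by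
  induction cs generalizing cur acc with
  | nil =>
      by_cases h : cur.isEmpty <;> simp [PySem.Chars.split₀.go, h]
  | cons c rest ih =>
      by_cases hs : PySem.Chars.isspace c
      · by_cases h : cur.isEmpty <;>
          simp [PySem.Chars.split₀.go, hs, h, ih ([]) acc,
            ih ([]) (cur.reverse :: acc), ih ([]) [cur.reverse]]
      · simp [PySem.Chars.split₀.go, hs, ih (c :: cur) acc]

-- key lemma: B's scan is the wrap-map of A's split, with the invariant that
-- plain is the lowercase-alpha key of raw and go's cur is raw reversed
theorem pv_scan_eq (cs : List Char) (raw : List Char) (pieces : List String) :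
    pvScan cs raw (pvPlainChars raw) pieces
      = pieces ++ (PySem.Chars.split₀.go cs raw.reverse []).map pvWrapChars := by
  induction cs generalizing raw pieces with
  | nil =>
      rcases eq_or_ne raw [] with hr | hr
      · subst hr; simp [pvScan, PySem.Chars.split₀.go]
      · simp [pvScan, PySem.Chars.split₀.go, hr, pvWrapChars]
  | cons c rest ih =>
      by_cases hs : PySem.Chars.isspace c
      · rcases eq_or_ne raw [] with hr | hr
        · subst hr
          simpa [pvScan, PySem.Chars.split₀.go, hs, pvPlainChars_nil] using ih [] pieces
        · rw [show pvScan (c :: rest) raw (pvPlainChars raw) pieces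
                = pvScan rest [] [] (pieces ++ [pvFlush raw (pvPlainChars raw)]) by
              simp [pvScan, hs, hr]]
          have h1 := ih [] (pieces ++ [pvFlush raw (pvPlainChars raw)])
          rw [pvPlainChars_nil] at h1
          rw [h1]
          simp only [PySem.Chars.split₀.go, hs, if_true, List.reverse_reverse]
          rw [pv_go_acc rest [] [raw]]
          simp [hr, pvWrapChars]
      · have h2 : (if PySem.Chars.isalpha c then pvPlainChars raw ++ [PySem.Chars.lowerChar c]
                   else pvPlainChars raw) = pvPlainChars (raw ++ [c]) := by
          by_cases ha : PySem.Chars.isalpha c <;> simp [pvPlainChars, List.filter_append, ha]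
        rw [show pvScan (c :: rest) raw (pvPlainChars raw) pieces
              = pvScan rest (raw ++ [c])
                  (if PySem.Chars.isalpha c then pvPlainChars raw ++ [PySem.Chars.lowerChar c]
                   else pvPlainChars raw) pieces by simp [pvScan, hs]]
        rw [h2, ih (raw ++ [c]) pieces]
        simp [PySem.Chars.split₀.go, hs]

-- ===== VERDICT (by name: the statement is the Claim_ definition above) =====
theorem highlight_important_words_spec : Claim_equal_highlight_important_words := by
  intro p _
  unfold Spec_highlight_important_words highlight_important_words highlight_important_words_alt
  rw [pv_loop_eq, List.nil_append]
  have := pv_scan_eq p.toList [] []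
  simp only [pvPlainChars, List.filter_nil, List.map_nil, List.reverse_nil] at this
  rw [this, List.nil_append]
  simp [PySem.Str.split₀, PySem.Chars.split₀, List.map_map, Function.comp_def]
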